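-- pv_equiv track=rewrite | github.com/Praful8763s/Python_Interview-Coding-Question | Tutorial41.py | min_operations_to_balance
-- ===== SOURCE A (Python) =====
-- def min_operations_to_balance(s):
--     balance = 0
--     operations = 0
--
--     for char in s:
--         if char == '(':
--             balance += 1
--         elif char == ')':
--             balance -= 1
--
--         # If balance is negative, we have an unmatched ')'
--         if balance < 0:
--             operations += 1
--             balance = 0  # Reset balance after fixing
--
--     # Remaining unmatched '(' will need to be closed
--     operations += balance
--
--     return operations
-- ===== SOURCE B (Python) =====
-- def min_operations_to_balance(s):
--     # Pass 1 (left-to-right): count unmatched ')'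
--     open_count = 0
--     close_fixes = 0
--     for ch in s:
--         if ch == '(':
--             open_count += 1
--         elif ch == ')':
--             if open_count > 0:
--                 open_count -= 1
--             else:
--                 close_fixes += 1
--     # Pass 2 (right-to-left): count unmatched '('
--     close_count = 0
--     open_fixes = 0
--     for ch in reversed(s):
--         if ch == ')':
--             close_count += 1
--         elif ch == '(':
--             if close_count > 0:
--                 close_count -= 1
--             else:
--                 open_fixes += 1
--     return close_fixes + open_fixes
-- ===== Notes on version B (the rewrite author's own statement) =====
-- stated objective: alternative
-- what changed: Replaces A's single pass with mutable balance-reset logic by two independent matching passes: a left-to-right pass counting unmatched ')' and a right-to-left pass counting unmatched '(', returning their sum.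
import Mathlib
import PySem

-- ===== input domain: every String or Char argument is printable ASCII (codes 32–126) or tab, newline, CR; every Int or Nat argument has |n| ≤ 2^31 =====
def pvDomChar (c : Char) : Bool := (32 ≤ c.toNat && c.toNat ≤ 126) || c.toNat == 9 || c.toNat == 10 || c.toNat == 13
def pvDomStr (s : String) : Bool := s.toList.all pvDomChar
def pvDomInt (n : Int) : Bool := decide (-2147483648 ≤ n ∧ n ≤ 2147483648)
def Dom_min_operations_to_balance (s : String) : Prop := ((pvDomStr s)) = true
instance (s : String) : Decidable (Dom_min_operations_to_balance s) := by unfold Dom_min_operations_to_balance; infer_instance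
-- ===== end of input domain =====

-- B replaces A's single balance-reset pass by two independent passes (unmatched ')' left-to-right,
-- unmatched '(' right-to-left) and returns the sum; objective: alternative decomposition, same cost.

-- ===== PORT A =====
-- one loop step of A: adjust balance, then fix a negative balance
def pvAStep (st : Int × Int) (c : Char) : Int × Int :=
  let b := if c = '(' then st.1 + 1 else if c = ')' then st.1 - 1 else st.1
  if b < 0 then (0, st.2 + 1) else (b, st.2)

def min_operations_to_balance (s : String) : Int :=
  let st := s.toList.foldl pvAStep (0, 0)
  st.2 + st.1

-- ===== PORT B =====
-- left-to-right pass: (open_count, close_fixes)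
def pvLStep (st : Int × Int) (c : Char) : Int × Int :=
  if c = '(' then (st.1 + 1, st.2)
  else if c = ')' then (if st.1 > 0 then (st.1 - 1, st.2) else (st.1, st.2 + 1))
  else st

-- right-to-left pass: (close_count, open_fixes)
def pvRStep (st : Int × Int) (c : Char) : Int × Int :=
  if c = ')' then (st.1 + 1, st.2)
  else if c = '(' then (if st.1 > 0 then (st.1 - 1, st.2) else (st.1, st.2 + 1))
  else st

def min_operations_to_balance_alt (s : String) : Int :=
  let l := s.toList.foldl pvLStep (0, 0)
  let r := s.toList.reverse.foldl pvRStep (0, 0)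
  l.2 + r.2

-- ===== PRECONDITION & SPEC =====
def Spec_min_operations_to_balance (s : String) (out : Int) : Prop := out = min_operations_to_balance_alt s
instance (s : String) (out : Int) : Decidable (Spec_min_operations_to_balance s out) := by unfold Spec_min_operations_to_balance; infer_instance

-- ===== CLAIM (what is proved, stated in full; the proofs are below) =====
def Claim_equal_min_operations_to_balance : Prop := ∀ (s : String), Dom_min_operations_to_balance s → Spec_min_operations_to_balance s (min_operations_to_balance s)

-- ===== LEMMAS AND PROOFS =====

theorem pvLStep_open (o f : Int) : pvLStep (o, f) '(' = (o + 1, f) := by simp [pvLStep]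

theorem pvLStep_close_pos (o f : Int) (h : o > 0) : pvLStep (o, f) ')' = (o - 1, f) := by
  simp [pvLStep, h]

theorem pvLStep_close_zero (f : Int) : pvLStep (0, f) ')' = (0, f + 1) := by simp [pvLStep]

theorem pvLStep_other (o f : Int) (c : Char) (h1 : ¬ c = '(') (h2 : ¬ c = ')') :
    pvLStep (o, f) c = (o, f) := by simp [pvLStep, h1, h2]

theorem pvRStep_close (k m : Int) : pvRStep (k, m) ')' = (k + 1, m) := by simp [pvRStep]

theorem pvRStep_open_pos (k m : Int) (h : k > 0) : pvRStep (k, m) '(' = (k - 1, m) := by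
  simp [pvRStep, h]

theorem pvRStep_open_zero (m : Int) : pvRStep ((0 : Int), m) '(' = (0, m + 1) := by simp [pvRStep]

theorem pvRStep_other (k m : Int) (c : Char) (h1 : ¬ c = '(') (h2 : ¬ c = ')') :
    pvRStep (k, m) c = (k, m) := by simp [pvRStep, h1, h2]

theorem pvAStep_open (b f : Int) (hb : 0 ≤ b) : pvAStep (b, f) '(' = (b + 1, f) := by
  simp [pvAStep, show ¬ (b + 1 < 0) from by omega]

theorem pvAStep_close_pos (b f : Int) (hb : b > 0) : pvAStep (b, f) ')' = (b - 1, f) := by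
  simp [pvAStep, show ¬ (b - 1 < 0) from by omega]

theorem pvAStep_close_zero (f : Int) : pvAStep ((0 : Int), f) ')' = (0, f + 1) := by
  simp [pvAStep]

theorem pvAStep_other (b f : Int) (c : Char) (hb : 0 ≤ b) (h1 : ¬ c = '(') (h2 : ¬ c = ')') :
    pvAStep (b, f) c = (b, f) := by
  simp [pvAStep, h1, h2, show ¬ (b < 0) from by omega]

-- nonnegativity of the left pass's components
theorem pvL_nonneg (t : List Char) : ∀ (o f : Int), 0 ≤ o → 0 ≤ f →
    0 ≤ (t.foldl pvLStep (o, f)).1 ∧ 0 ≤ (t.foldl pvLStep (o, f)).2 := by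
  induction t with
  | nil => intro o f ho hf; simpa using ⟨ho, hf⟩
  | cons c t ih =>
    intro o f ho hf
    simp only [List.foldl_cons, pvLStep]
    split_ifs with h1 h2 h3
    · exact ih _ _ (by omega) hf
    · exact ih _ _ (by omega) hf
    · exact ih _ _ ho (by omega)
    · exact ih o f ho hf

-- general shape of the left pass from an arbitrary nonnegative state, in terms of the (0,0) run
theorem pvL_general (t : List Char) : ∀ (o f : Int), 0 ≤ o →
    t.foldl pvLStep (o, f) =
      ((t.foldl pvLStep (0, 0)).1 + max 0 (o - (t.foldl pvLStep (0, 0)).2),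
       f + max 0 ((t.foldl pvLStep (0, 0)).2 - o)) := by
  induction t with
  | nil => intro o f ho; simp; omega
  | cons c t ih =>
    intro o f ho
    obtain ⟨hO, hC⟩ := pvL_nonneg t 0 0 le_rfl le_rfl
    by_cases h1 : c = '('
    · subst h1
      rw [List.foldl_cons, List.foldl_cons, pvLStep_open, pvLStep_open,
          ih (o + 1) f (by omega), ih (0 + 1) 0 (by omega)]
      rw [Prod.ext_iff]; constructor <;> simp <;> omega
    · by_cases h2 : c = ')'
      · subst h2
        rw [List.foldl_cons, List.foldl_cons, pvLStep_close_zero, ih 0 (0 + 1) le_rfl]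
        by_cases ho0 : o > 0
        · rw [pvLStep_close_pos o f ho0, ih (o - 1) f (by omega)]
          rw [Prod.ext_iff]; constructor <;> simp <;> omega
        · have ho' : o = 0 := by omega
          subst ho'
          rw [pvLStep_close_zero, ih 0 (f + 1) le_rfl]
          rw [Prod.ext_iff]; constructor <;> simp <;> omega
      · rw [List.foldl_cons, List.foldl_cons, pvLStep_other o f c h1 h2,
            pvLStep_other 0 0 c h1 h2]
        exact ih o f ho

-- A's fold agrees with the left pass from any nonnegative balance
theorem pvA_eq_pvL (t : List Char) : ∀ (b f : Int), 0 ≤ b →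
    t.foldl pvAStep (b, f) = t.foldl pvLStep (b, f) := by
  induction t with
  | nil => intro b f _; rfl
  | cons c t ih =>
    intro b f hb
    rw [List.foldl_cons, List.foldl_cons]
    by_cases h1 : c = '('
    · subst h1
      rw [pvLStep_open, pvAStep_open b f hb]
      exact ih _ _ (by omega)
    · by_cases h2 : c = ')'
      · subst h2
        by_cases hb0 : b > 0
        · rw [pvLStep_close_pos b f hb0, pvAStep_close_pos b f hb0]
          exact ih _ _ (by omega)
        · have hb' : b = 0 := by omega
          subst hb'
          rw [pvLStep_close_zero, pvAStep_close_zero]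
          exact ih _ _ le_rfl
      · rw [pvAStep_other b f c hb h1 h2, pvLStep_other b f c h1 h2]
        exact ih b f hb

-- the right pass over the reversed list, from an arbitrary nonnegative state,
-- in terms of the left pass of the list
theorem pvR_rev (t : List Char) : ∀ (k m : Int), 0 ≤ k →
    t.reverse.foldl pvRStep (k, m) =
      (((t.foldl pvLStep (0, 0)).2 : Int) + max 0 (k - (t.foldl pvLStep (0, 0)).1),
       m + max 0 ((t.foldl pvLStep (0, 0)).1 - k)) := by
  induction t with
  | nil => intro k m hk; simp; omega
  | cons c t ih =>
    intro k m hk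
    obtain ⟨hO, hC⟩ := pvL_nonneg t 0 0 le_rfl le_rfl
    have hrev : (c :: t).reverse = t.reverse ++ [c] := by simp
    rw [hrev, List.foldl_append, ih k m hk, List.foldl_cons, List.foldl_nil]
    by_cases h1 : c = '('
    · subst h1
      have hL := pvL_general t (0 + 1) 0 (by omega)
      rw [List.foldl_cons, pvLStep_open, hL]
      by_cases hc : (t.foldl pvLStep (0, 0)).2 + max 0 (k - (t.foldl pvLStep (0, 0)).1) > 0
      · rw [pvRStep_open_pos _ _ hc]
        rw [Prod.ext_iff]; constructor <;> simp <;> omega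
      · have h0 : (t.foldl pvLStep (0, 0)).2 + max 0 (k - (t.foldl pvLStep (0, 0)).1) = 0 := by
          omega
        rw [h0, pvRStep_open_zero]
        rw [Prod.ext_iff]; constructor <;> simp <;> omega
    · by_cases h2 : c = ')'
      · subst h2
        have hL := pvL_general t 0 (0 + 1) le_rfl
        rw [List.foldl_cons, pvLStep_close_zero, hL, pvRStep_close]
        rw [Prod.ext_iff]; constructor <;> simp <;> omega
      · rw [List.foldl_cons, pvLStep_other 0 0 c h1 h2, pvRStep_other _ _ c h1 h2]

-- ===== VERDICT (by name: the statement is the Claim_ definition above) =====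
theorem min_operations_to_balance_spec : Claim_equal_min_operations_to_balance := by
  intro s _
  unfold Spec_min_operations_to_balance min_operations_to_balance min_operations_to_balance_alt
  obtain ⟨h1, h2⟩ := pvL_nonneg s.toList 0 0 le_rfl le_rfl
  rw [pvA_eq_pvL s.toList 0 0 le_rfl, pvR_rev s.toList 0 0 le_rfl]
  simp
  omega
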